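-- pv_equiv track=rewrite | github.com/esfiro4ka/CodeProblems | leetcode/problems/merge_similar_items/solution_without_hash.py | mergeSimilarItems
-- ===== SOURCE A (Python) =====
-- def mergeSimilarItems(items1, items2):
--     combined = items1 + items2
--     combined.sort()
--     result = []
--     current_key = combined[0][0]
--     current_value = combined[0][1]
--
--     for i in range(1, len(combined)):
--         key, value = combined[i]
--         if key == current_key:
--             current_value += value
--         else:
--             result.append([current_key, current_value])
--             current_key = key
--             current_value = value
--
--     # Добавляем последний элемент
--     result.append([current_key, current_value])
--
--     return result
-- ===== SOURCE B (Python) =====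
-- def mergeSimilarItems(items1, items2):
--     total = {}
--     for key, value in items1 + items2:
--         total[key] = total.get(key, 0) + value
--     return [[k, total[k]] for k in sorted(total)]
-- ===== Notes on version B (the rewrite author's own statement) =====
-- stated objective: idiomatic
-- what changed: Replaces the sort-whole-list-then-merge-adjacent-runs pass by a single dict accumulation of values per key followed by a sort of the distinct keys only.
-- outside the precondition, e.g. on mergeSimilarItems([], []): A raises IndexError, B returns []; on mergeSimilarItems([[1, 2, 3]], []): A returns [[1, 2]], B raises ValueError; on mergeSimilarItems([[1]], [[2, 3]]): A raises IndexError, B raises ValueError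
import Mathlib
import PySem

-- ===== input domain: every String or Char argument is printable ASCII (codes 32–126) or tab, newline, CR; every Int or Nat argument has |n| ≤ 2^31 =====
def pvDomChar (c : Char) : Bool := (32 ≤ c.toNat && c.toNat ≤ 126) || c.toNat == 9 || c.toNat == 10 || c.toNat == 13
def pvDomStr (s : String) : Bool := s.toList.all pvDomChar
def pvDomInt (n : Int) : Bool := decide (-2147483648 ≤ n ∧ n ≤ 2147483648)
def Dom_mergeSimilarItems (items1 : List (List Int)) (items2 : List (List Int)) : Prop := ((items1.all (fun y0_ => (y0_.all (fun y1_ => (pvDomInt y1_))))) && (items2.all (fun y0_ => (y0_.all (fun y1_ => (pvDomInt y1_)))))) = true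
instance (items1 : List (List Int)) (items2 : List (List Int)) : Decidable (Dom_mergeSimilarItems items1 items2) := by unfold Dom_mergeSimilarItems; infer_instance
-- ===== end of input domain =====

-- B replaces A's sort-everything-then-merge-adjacent-runs pass with a dict accumulation of
-- values per key followed by a sort of the distinct keys (idiomatic one-pass accumulation).

-- ===== PORT A =====
-- Literal port of A: sort items1 + items2 (Python list order = lexicographic), take the first
-- pair as the running (key, value), then fold over range(1, len) merging adjacent equal keys.
-- combined[0][0]/combined[0][1] and the tuple unpacking are pyGetD: exact under Pre_ (nonempty,
-- all inner lists of length 2), which excludes every input where Python raises.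
def mergeSimilarItems (items1 : List (List Int)) (items2 : List (List Int)) : List (List Int) :=
  let combined := PySem.List.sorted (items1 ++ items2) (fun l => l) false
  let current_key := PySem.List.pyGetD (PySem.List.pyGetD combined 0 []) 0 0
  let current_value := PySem.List.pyGetD (PySem.List.pyGetD combined 0 []) 1 0
  let st := (PySem.List.pyRange 1 (combined.length : Int) 1).foldl
    (fun (st : List (List Int) × Int × Int) i =>
      if PySem.List.pyGetD (PySem.List.pyGetD combined i []) 0 0 = st.2.1 then
        (st.1, st.2.1, st.2.2 + PySem.List.pyGetD (PySem.List.pyGetD combined i []) 1 0)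
      else
        (st.1 ++ [[st.2.1, st.2.2]],
         PySem.List.pyGetD (PySem.List.pyGetD combined i []) 0 0,
         PySem.List.pyGetD (PySem.List.pyGetD combined i []) 1 0))
    ([], current_key, current_value)
  st.1 ++ [[st.2.1, st.2.2]]

-- ===== PORT B =====
-- Literal port of Source B: total[key] = total.get(key, 0) + value over items1 + items2, then
-- [[k, total[k]] for k in sorted(total)].  total[k] with k drawn from total's keys is exact
-- as getD (the key is always present).
def mergeSimilarItems_alt (items1 : List (List Int)) (items2 : List (List Int)) : List (List Int) :=
  let total := (items1 ++ items2).foldl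
    (fun (d : PySem.Dict Int Int) l =>
      d.insert (PySem.List.pyGetD l 0 0)
        (d.getD (PySem.List.pyGetD l 0 0) 0 + PySem.List.pyGetD l 1 0))
    PySem.Dict.empty
  (PySem.List.sorted total.keys (fun k => k) false).map (fun k => [k, total.getD k 0])

-- ===== PRECONDITION & SPEC =====
-- Pre_ excludes inputs whose concatenation is empty (A raises IndexError reading combined[0])
-- and inputs containing an inner list of length ≠ 2 (A raises IndexError/ValueError unpacking,
-- except the degenerate single-overlong-item cases where A's truncated first pair is an
-- artefact of its implementation and B naturally raises ValueError).
def Pre_mergeSimilarItems (items1 : List (List Int)) (items2 : List (List Int)) : Prop :=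
  items1 ++ items2 ≠ [] ∧ ∀ l ∈ items1 ++ items2, l.length = 2
instance (items1 : List (List Int)) (items2 : List (List Int)) : Decidable (Pre_mergeSimilarItems items1 items2) := by unfold Pre_mergeSimilarItems; infer_instance
def pvWitness_mergeSimilarItems : List (List Int) × List (List Int) := ([[1, 2], [1, 5]], [[3, 4]])

def Spec_mergeSimilarItems (items1 : List (List Int)) (items2 : List (List Int)) (out : List (List Int)) : Prop := out = mergeSimilarItems_alt items1 items2
instance (items1 : List (List Int)) (items2 : List (List Int)) (out : List (List Int)) : Decidable (Spec_mergeSimilarItems items1 items2 out) := by unfold Spec_mergeSimilarItems; infer_instance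

-- ===== CLAIM (what is proved, stated in full; the proofs are below) =====
def Claim_equal_mergeSimilarItems : Prop := ∀ (items1 : List (List Int)) (items2 : List (List Int)), Dom_mergeSimilarItems items1 items2 → Pre_mergeSimilarItems items1 items2 → Spec_mergeSimilarItems items1 items2 (mergeSimilarItems items1 items2)

-- ===== LEMMAS AND PROOFS =====

-- The (key, value) pair a length-2 inner list denotes.
def toPair (l : List Int) : Int × Int := (PySem.List.pyGetD l 0 0, PySem.List.pyGetD l 1 0)

-- Sum of the values attached to key k.
def sumV (k : Int) (ps : List (Int × Int)) : Int := ((ps.filter (fun p => p.1 == k)).map (·.2)).sum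

-- A's merge loop as a structural recursion over the (key, value) pairs.
def mergeRec : Int → Int → List (Int × Int) → List (Int × Int)
  | k, v, [] => [(k, v)]
  | k, v, (k', v') :: t => if k' = k then mergeRec k (v + v') t else (k, v) :: mergeRec k' v' t

theorem sumV_cons (k : Int) (p : Int × Int) (l : List (Int × Int)) :
    sumV k (p :: l) = (if p.1 = k then p.2 else 0) + sumV k l := by
  simp only [sumV, List.filter_cons, beq_iff_eq]
  split_ifs <;> simp

theorem sumV_eq_zero_of_not_mem (k : Int) (l : List (Int × Int)) (h : k ∉ l.map Prod.fst) :
    sumV k l = 0 := by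
  induction l with
  | nil => rfl
  | cons p t ih =>
    simp only [List.map_cons, List.mem_cons, not_or] at h
    rw [sumV_cons, if_neg (fun hh => h.1 hh.symm), ih h.2, add_zero]

theorem sumV_perm (k : Int) {l l' : List (Int × Int)} (h : l.Perm l') : sumV k l = sumV k l' := by
  exact List.Perm.sum_eq ((h.filter _).map _)

-- ===== everything about PORT A =====

theorem loopA :
    ∀ (rest : List (List Int)) (acc : List (List Int)) (k v : Int),
    (let st := rest.foldl
        (fun (st : List (List Int) × Int × Int) (l : List Int) =>
          if PySem.List.pyGetD l 0 0 = st.2.1 then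
            (st.1, st.2.1, st.2.2 + PySem.List.pyGetD l 1 0)
          else
            (st.1 ++ [[st.2.1, st.2.2]], PySem.List.pyGetD l 0 0, PySem.List.pyGetD l 1 0))
        (acc, k, v)
     st.1 ++ [[st.2.1, st.2.2]])
    = acc ++ (mergeRec k v (rest.map toPair)).map (fun p => [p.1, p.2]) := by
  intro rest
  induction rest with
  | nil => intro acc k v; simp [mergeRec]
  | cons l t ih =>
    intro acc k v
    simp only [List.foldl_cons, List.map_cons, mergeRec, toPair]
    by_cases h : PySem.List.pyGetD l 0 0 = k
    · simp only [h]
      exact ih acc k (v + PySem.List.pyGetD l 1 0)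
    · simp only [if_neg h]
      rw [ih]
      simp

theorem discard_cons_self (x : Int) (s : List Int) :
    PySem.Set.discard (x :: s) x = PySem.Set.discard s x := by
  simp [PySem.Set.discard]

theorem discard_discard (s : List Int) (x : Int) :
    PySem.Set.discard (PySem.Set.discard s x) x = PySem.Set.discard s x := by
  simp [PySem.Set.discard, List.filter_filter]

theorem discard_of_not_mem (s : List Int) (x : Int) (h : x ∉ s) :
    PySem.Set.discard s x = s := by
  apply List.filter_eq_self.mpr
  intro y hy
  simp only [Bool.not_eq_eq_eq_not, Bool.not_true, beq_eq_false_iff_ne]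
  exact fun hxy => h (hxy ▸ hy)

theorem dedup_cons_cons (x : Int) (l : List Int) :
    PySem.List.dedup (x :: x :: l) = PySem.List.dedup (x :: l) := by
  simp only [PySem.List.dedup_eq_ofList, PySem.Set.ofList_cons]
  rw [discard_cons_self, discard_discard]

theorem dedup_cons_of_not_mem (x : Int) (l : List Int) (h : x ∉ l) :
    PySem.List.dedup (x :: l) = x :: PySem.List.dedup l := by
  simp only [PySem.List.dedup_eq_ofList, PySem.Set.ofList_cons]
  rw [discard_of_not_mem _ _ (by simpa [PySem.Set.mem_ofList] using h)]

-- mergeRec on a key-sorted pair list is the dedup-of-keys / sum-of-values table.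
theorem mergeRec_eq_canonical :
    ∀ (ps : List (Int × Int)) (k v : Int),
    List.Pairwise (fun a b => a.1 ≤ b.1) ((k, v) :: ps) →
    mergeRec k v ps
      = (PySem.List.dedup (((k, v) :: ps).map Prod.fst)).map
          (fun key => (key, sumV key ((k, v) :: ps))) := by
  intro ps
  induction ps with
  | nil =>
    intro k v _
    simp only [List.map_cons, List.map_nil, mergeRec]
    rw [dedup_cons_of_not_mem _ _ (by simp)]
    simp [PySem.List.dedup_eq_ofList, PySem.Set.ofList_nil, sumV]
  | cons p t ih =>
    intro k v h
    obtain ⟨hk1, h1⟩ := List.pairwise_cons.mp h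
    obtain ⟨hk2, h2⟩ := List.pairwise_cons.mp h1
    by_cases hkk : p.1 = k
    · -- same key: merge the two values
      have hpair : List.Pairwise (fun a b : Int × Int => a.1 ≤ b.1) ((k, v + p.2) :: t) :=
        List.pairwise_cons.mpr ⟨fun a ha => hkk ▸ hk2 a ha, h2⟩
      have := ih k (v + p.2) hpair
      simp only [mergeRec, if_pos hkk]
      rw [this]
      simp only [List.map_cons, hkk, dedup_cons_cons]
      apply List.map_congr_left
      intro key _
      have : sumV key ((k, v) :: p :: t) = sumV key ((k, v + p.2) :: t) := by
        rw [sumV_cons, sumV_cons, sumV_cons, hkk]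
        split_ifs <;> ring
      rw [this]
    · -- new key: emit (k, v) and recurse
      have hkp : k < p.1 := lt_of_le_of_ne (hk1 p (List.mem_cons_self)) (fun e => hkk e.symm)
      have hklt : ∀ q ∈ p :: t, k < q.1 := by
        intro q hq
        rcases List.mem_cons.mp hq with rfl | hq'
        · exact hkp
        · exact lt_of_lt_of_le hkp (hk2 q hq')
      have hnot : k ∉ (p :: t).map Prod.fst := by
        intro hmem
        obtain ⟨q, hq, hq2⟩ := List.mem_map.mp hmem
        exact absurd (hq2 ▸ hklt q hq) (lt_irrefl k)
      simp only [mergeRec, if_neg hkk]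
      rw [ih p.1 p.2 (by simpa using h1)]
      simp only [List.map_cons] at hnot ⊢
      rw [dedup_cons_of_not_mem _ _ hnot]
      simp only [List.map_cons]
      congr 1
      · have : sumV k (p :: t) = 0 :=
          sumV_eq_zero_of_not_mem _ _ (by simpa using hnot)
        rw [sumV_cons, if_pos rfl, this, add_zero]
      · apply List.map_congr_left
        intro key hkey
        have hkmem : key ∈ (p :: t).map Prod.fst := by
          simpa [PySem.List.dedup_eq_ofList, PySem.Set.mem_ofList] using hkey
        have hne : key ≠ k := by
          obtain ⟨q, hq, hq2⟩ := List.mem_map.mp hkmem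
          intro e
          exact absurd (hklt q hq) (by rw [hq2, e]; exact lt_irrefl k)
        have h1' : sumV key ((k, v) :: p :: t) = sumV key (p :: t) := by
          rw [sumV_cons, if_neg (fun e => hne e.symm), zero_add]
        simp [h1']

-- ===== everything about PORT B =====

theorem getD_foldB (l : List (Int × Int)) :
    ∀ (d : PySem.Dict Int Int) (k : Int),
    (l.foldl (fun (d : PySem.Dict Int Int) p => d.insert p.1 (d.getD p.1 0 + p.2)) d).getD k 0
      = d.getD k 0 + sumV k l := by
  induction l with
  | nil => intro d k; simp [sumV]
  | cons p t ih =>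
    intro d k
    simp only [List.foldl_cons]
    rw [ih, sumV_cons, PySem.Dict.getD_insert]
    split_ifs with h1 h2 h3 <;> simp_all; ring

-- ===== the bridge =====

theorem discard_sublist (s : List Int) (x : Int) :
    List.Sublist (PySem.Set.discard s x) s := by
  simp only [PySem.Set.discard]
  exact List.filter_sublist

theorem dedup_sublist (l : List Int) : List.Sublist (PySem.List.dedup l) l := by
  induction l with
  | nil => simp
  | cons x t ih =>
    rw [PySem.List.dedup_eq_ofList, PySem.Set.ofList_cons]
    exact List.cons_sublist_cons.mpr ((discard_sublist _ x).trans (by simpa using ih))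

theorem head_le_of_le (a b : List Int) (ha : a.length = 2) (hb : b.length = 2) (h : a ≤ b) :
    PySem.List.pyGetD a 0 0 ≤ PySem.List.pyGetD b 0 0 := by
  obtain ⟨x1, x2, rfl⟩ := List.length_eq_two.mp ha
  obtain ⟨y1, y2, rfl⟩ := List.length_eq_two.mp hb
  simp only [PySem.List.pyGetD]
  by_contra hc
  exact absurd h (not_le.mpr (List.Lex.rel (lt_of_not_ge hc)))

theorem dedup_pairwise_lt (l : List Int) (h : List.Pairwise (· ≤ ·) l) :
    List.Pairwise (· < ·) (PySem.List.dedup l) := by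
  have hs := dedup_sublist l
  have hle : List.Pairwise (· ≤ ·) (PySem.List.dedup l) := h.sublist hs
  have hne : List.Pairwise (· ≠ ·) (PySem.List.dedup l) := PySem.List.nodup_dedup l
  exact (hle.and hne).imp (fun hab => lt_of_le_of_ne hab.1 hab.2)

-- ===== main proof =====

-- sorted over (List Int) with the instances the port elaborates with equals sorted with the
-- LinearOrder-derived instances the PySem order lemmas are stated for (the LT's are defeq,
-- the Decidable instances are propositionally equal).
theorem sortedList_inst (xs : List (List Int)) :
    PySem.List.sorted xs (fun l => l) false
      = @PySem.List.sorted (List Int) (List Int) List.instLinearOrder.toLT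
          LinearOrder.toDecidableLT xs (fun l => l) false :=
  congrArg (fun d : @DecidableLT (List Int) List.instLinearOrder.toLT =>
      @PySem.List.sorted (List Int) (List Int) List.instLinearOrder.toLT d xs (fun l => l) false)
    (by funext a b; exact Subsingleton.elim _ _)

theorem main_eq (items1 items2 : List (List Int))
    (hpre : Pre_mergeSimilarItems items1 items2) :
    mergeSimilarItems items1 items2 = mergeSimilarItems_alt items1 items2 := by
  obtain ⟨hne, hlen⟩ := hpre
  set combined := items1 ++ items2 with hcomb
  set s := PySem.List.sorted combined (fun l => l) false with hs
  have hsL : s = @PySem.List.sorted (List Int) (List Int) List.instLinearOrder.toLT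
      LinearOrder.toDecidableLT combined (fun l => l) false := hs.trans (sortedList_inst combined)
  have hsne : s ≠ [] := fun h => hne ((PySem.List.sorted_eq_nil_iff _ _ _).mp h)
  have hpermsp : (s.map toPair).Perm (combined.map toPair) :=
    (PySem.List.sorted_perm combined (fun l => l) false).map toPair
  have hsp : List.Pairwise (· ≤ ·) s := by
    rw [hsL]; exact PySem.List.sorted_pairwise combined (fun l => l)
  have hlen2 : ∀ l ∈ s, l.length = 2 := fun l hl =>
    hlen l ((PySem.List.mem_sorted combined (fun l => l) false l).mp hl)
  have hfstle : List.Pairwise (fun a b : Int × Int => a.1 ≤ b.1) (s.map toPair) := by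
    rw [List.pairwise_map]
    exact hsp.imp_of_mem (fun {a b} ha hb hab =>
      head_le_of_le a b (hlen2 a ha) (hlen2 b hb) hab)
  obtain ⟨c0, rest, hcons⟩ := List.exists_cons_of_ne_nil hsne
  -- ===== A side =====
  have e1 : (PySem.List.pyRange 1 (s.length : Int) 1).foldl
      (fun (st : List (List Int) × Int × Int) i =>
        if PySem.List.pyGetD (PySem.List.pyGetD s i []) 0 0 = st.2.1 then
          (st.1, st.2.1, st.2.2 + PySem.List.pyGetD (PySem.List.pyGetD s i []) 1 0)
        else
          (st.1 ++ [[st.2.1, st.2.2]],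
           PySem.List.pyGetD (PySem.List.pyGetD s i []) 0 0,
           PySem.List.pyGetD (PySem.List.pyGetD s i []) 1 0))
      ([], PySem.List.pyGetD (PySem.List.pyGetD s 0 []) 0 0,
           PySem.List.pyGetD (PySem.List.pyGetD s 0 []) 1 0)
      = (s.drop 1).foldl
        (fun (st : List (List Int) × Int × Int) (l : List Int) =>
          if PySem.List.pyGetD l 0 0 = st.2.1 then
            (st.1, st.2.1, st.2.2 + PySem.List.pyGetD l 1 0)
          else
            (st.1 ++ [[st.2.1, st.2.2]], PySem.List.pyGetD l 0 0, PySem.List.pyGetD l 1 0))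
        ([], PySem.List.pyGetD (PySem.List.pyGetD s 0 []) 0 0,
             PySem.List.pyGetD (PySem.List.pyGetD s 0 []) 1 0) :=
    PySem.List.foldl_pyRange_pyGetD' s ([] : List Int)
      (fun (st : List (List Int) × Int × Int) (l : List Int) =>
        if PySem.List.pyGetD l 0 0 = st.2.1 then
          (st.1, st.2.1, st.2.2 + PySem.List.pyGetD l 1 0)
        else
          (st.1 ++ [[st.2.1, st.2.2]], PySem.List.pyGetD l 0 0, PySem.List.pyGetD l 1 0))
      ([], PySem.List.pyGetD (PySem.List.pyGetD s 0 []) 0 0,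
           PySem.List.pyGetD (PySem.List.pyGetD s 0 []) 1 0)
      (a := 1) (by norm_num)
  have hA : mergeSimilarItems items1 items2
      = (mergeRec (toPair c0).1 (toPair c0).2 (rest.map toPair)).map (fun p => [p.1, p.2]) := by
    have h2 := congrArg (fun st : List (List Int) × Int × Int =>
      st.1 ++ [[st.2.1, st.2.2]]) e1
    have h3 : mergeSimilarItems items1 items2
        = [] ++ (mergeRec (PySem.List.pyGetD (PySem.List.pyGetD s 0 []) 0 0)
            (PySem.List.pyGetD (PySem.List.pyGetD s 0 []) 1 0)
            ((s.drop 1).map toPair)).map (fun p => [p.1, p.2]) :=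
      h2.trans (loopA (s.drop 1) []
        (PySem.List.pyGetD (PySem.List.pyGetD s 0 []) 0 0)
        (PySem.List.pyGetD (PySem.List.pyGetD s 0 []) 1 0))
    rw [h3, hcons]
    simp [PySem.List.pyGetD_zero_cons, toPair]
  have hcanon : mergeSimilarItems items1 items2
      = ((PySem.List.dedup ((s.map toPair).map Prod.fst)).map
          (fun key => (key, sumV key (s.map toPair)))).map (fun p => [p.1, p.2]) := by
    rw [hA, mergeRec_eq_canonical (rest.map toPair) (toPair c0).1 (toPair c0).2
      (by rw [hcons] at hfstle; simpa using hfstle)]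
    rw [hcons]
    simp
  -- ===== B side =====
  have hfold : combined.foldl
      (fun (d : PySem.Dict Int Int) l =>
        d.insert (PySem.List.pyGetD l 0 0)
          (d.getD (PySem.List.pyGetD l 0 0) 0 + PySem.List.pyGetD l 1 0))
      PySem.Dict.empty
      = (combined.map toPair).foldl (fun (d : PySem.Dict Int Int) p => d.insert p.1 (d.getD p.1 0 + p.2))
          PySem.Dict.empty :=
    by rw [List.foldl_map]; rfl
  have hkeys : ((combined.map toPair).foldl (fun (d : PySem.Dict Int Int) p => d.insert p.1 (d.getD p.1 0 + p.2))
      PySem.Dict.empty).keys = PySem.Set.ofList ((combined.map toPair).map Prod.fst) := by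
    have h := PySem.Dict.keys_foldl_insert_key (combined.map toPair) Prod.fst
      (fun (d : PySem.Dict Int Int) p => d.getD p.1 0 + p.2) PySem.Dict.empty
    rw [h, PySem.Dict.keys_empty, PySem.Set.update_nil_left]
  have hgetD : ∀ k, ((combined.map toPair).foldl (fun (d : PySem.Dict Int Int) p => d.insert p.1 (d.getD p.1 0 + p.2))
      PySem.Dict.empty).getD k 0 = sumV k (combined.map toPair) := by
    intro k
    rw [getD_foldB (combined.map toPair) PySem.Dict.empty k, PySem.Dict.getD_empty, zero_add]
  have hB : mergeSimilarItems_alt items1 items2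
      = (PySem.List.sorted (PySem.Set.ofList ((combined.map toPair).map Prod.fst)) (fun k => k) false).map
          (fun k => [k, sumV k (combined.map toPair)]) := by
    show (PySem.List.sorted (combined.foldl
        (fun (d : PySem.Dict Int Int) l =>
          d.insert (PySem.List.pyGetD l 0 0)
            (d.getD (PySem.List.pyGetD l 0 0) 0 + PySem.List.pyGetD l 1 0))
        PySem.Dict.empty).keys (fun k => k) false).map _ = _
    rw [hfold, hkeys]
    apply List.map_congr_left
    intro k _
    rw [hgetD k]
  -- ===== bridge =====
  have hK1lt : List.Pairwise (· < ·) (PySem.List.dedup ((s.map toPair).map Prod.fst)) := by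
    apply dedup_pairwise_lt
    rw [List.pairwise_map]
    exact hfstle
  have hKperm : (PySem.List.dedup ((s.map toPair).map Prod.fst)).Perm (PySem.Set.ofList ((combined.map toPair).map Prod.fst)) := by
    apply (List.perm_ext_iff_of_nodup (PySem.List.nodup_dedup _) (PySem.Set.nodup_ofList _)).mpr
    intro a
    rw [PySem.List.dedup_eq_ofList, PySem.Set.mem_ofList, PySem.Set.mem_ofList]
    exact (hpermsp.map Prod.fst).mem_iff
  have hsortK : PySem.List.sorted (PySem.Set.ofList ((combined.map toPair).map Prod.fst)) (fun k => k) false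
      = PySem.List.dedup ((s.map toPair).map Prod.fst) :=
    PySem.List.sorted_eq_of_perm_of_pairwise_lt _ _ _ hKperm hK1lt
  rw [hcanon, hB, hsortK, List.map_map]
  apply List.map_congr_left
  intro key _
  simp [Function.comp, sumV_perm key hpermsp]

-- ===== VERDICT (by name: the statement is the Claim_ definition above) =====
theorem mergeSimilarItems_spec : Claim_equal_mergeSimilarItems := by
  intro items1 items2 _ hpre
  exact main_eq items1 items2 hpre
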